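-- pv_equiv track=rewrite | github.com/Yeshdok/Stock_AI_Analysis | src/app.py | _match_market_filter_for_count
-- ===== SOURCE A (Python) =====
-- from typing import List, Dict
--
-- def _match_market_filter_for_count(stock: Dict, markets: List[str]) -> bool:
--     """检查股票是否符合市场筛选条件（用于数量统计）"""
--     if 'all' in markets or not markets:
--         return True
--
--     code = stock['code']
--
--     # 市场映射
--     market_checks = {
--         'main_board_sh': lambda c: c.startswith('6') and not c.startswith('688'),  # 沪A主板
--         'star_market': lambda c: c.startswith('688'),  # 科创板
--         'main_board_sz': lambda c: c.startswith('0'),  # 深A主板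
--         'gem': lambda c: c.startswith('3'),  # 创业板
--         'beijing': lambda c: c.startswith('8'),  # 北交所
--         'sh': lambda c: c.startswith('6'),  # 所有沪A
--         'sz': lambda c: c.startswith(('0', '3')),  # 所有深A
--     }
--
--     for market in markets:
--         if market in market_checks:
--             if market_checks[market](code):
--                 return True
--
--     return False
-- ===== SOURCE B (Python) =====
-- def _match_market_filter_for_count(stock, markets):
--     if 'all' in markets or not markets:
--         return True
--
--     code = stock['code']
--
--     # Build the set of market labels this code belongs to, then intersect.
--     matched = set()
--     if code.startswith('688'):
--         matched |= {'star_market', 'sh'}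
--     elif code.startswith('6'):
--         matched |= {'main_board_sh', 'sh'}
--     elif code.startswith('0'):
--         matched |= {'main_board_sz', 'sz'}
--     elif code.startswith('3'):
--         matched |= {'gem', 'sz'}
--     elif code.startswith('8'):
--         matched.add('beijing')
--
--     return bool(matched & set(markets))
-- ===== Notes on version B (the rewrite author's own statement) =====
-- stated objective: alternative
-- what changed: Instead of looping over markets and testing each against a dict of prefix lambdas, B classifies the code once into its set of market labels and returns whether that set intersects the requested markets.
-- outside the precondition, e.g. on _match_market_filter_for_count({}, ['sh']): A raises KeyError, B raises KeyError
import Mathlib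
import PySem

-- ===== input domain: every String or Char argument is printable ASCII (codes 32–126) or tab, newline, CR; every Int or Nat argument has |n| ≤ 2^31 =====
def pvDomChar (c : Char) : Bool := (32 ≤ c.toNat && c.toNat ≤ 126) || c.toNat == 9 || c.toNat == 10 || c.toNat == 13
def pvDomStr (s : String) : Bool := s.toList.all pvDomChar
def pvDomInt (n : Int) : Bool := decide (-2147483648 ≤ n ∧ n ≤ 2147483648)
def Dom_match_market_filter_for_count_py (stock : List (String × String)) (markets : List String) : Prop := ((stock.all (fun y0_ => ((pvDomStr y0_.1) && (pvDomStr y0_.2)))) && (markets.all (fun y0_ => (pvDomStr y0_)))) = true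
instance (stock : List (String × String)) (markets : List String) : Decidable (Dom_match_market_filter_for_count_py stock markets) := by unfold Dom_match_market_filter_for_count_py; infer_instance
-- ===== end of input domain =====

-- B classifies the code once into its set of market labels and intersects with the
-- requested markets, instead of A's per-market loop over a dict of prefix lambdas.
-- Equivalence is about the RETURN value; neither program mutates its arguments.

-- ===== PORT A =====
-- the market_checks dict of A: lookup a market name, returning its predicate applied to c
def pvMarketCheck? (m : String) (c : String) : Option Bool :=
  if m == "main_board_sh" then some (PySem.Str.startswith c "6" && !(PySem.Str.startswith c "688"))
  else if m == "star_market" then some (PySem.Str.startswith c "688")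
  else if m == "main_board_sz" then some (PySem.Str.startswith c "0")
  else if m == "gem" then some (PySem.Str.startswith c "3")
  else if m == "beijing" then some (PySem.Str.startswith c "8")
  else if m == "sh" then some (PySem.Str.startswith c "6")
  else if m == "sz" then some (PySem.Str.startswith c "0" || PySem.Str.startswith c "3")
  else none

def match_market_filter_for_count_py (stock : List (String × String)) (markets : List String) : Bool :=
  if markets.contains "all" || markets.isEmpty then true
  else
    match PySem.Dict.get? (PySem.Dict.mk stock) "code" with
    | none => false  -- Python raises KeyError here; excluded by Pre_
    | some code =>
      -- for market in markets: early return True ≡ fold with boolean accumulator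
      markets.foldl (fun acc m =>
        acc || (match pvMarketCheck? m code with
                | some b => b
                | none => false)) false

-- ===== PORT B =====
-- the set of market labels the code belongs to (Source B's if/elif chain building `matched`)
def pvCodeMarkets (code : String) : PySem.Set String :=
  if PySem.Str.startswith code "688" then PySem.Set.ofList ["star_market", "sh"]
  else if PySem.Str.startswith code "6" then PySem.Set.ofList ["main_board_sh", "sh"]
  else if PySem.Str.startswith code "0" then PySem.Set.ofList ["main_board_sz", "sz"]
  else if PySem.Str.startswith code "3" then PySem.Set.ofList ["gem", "sz"]
  else if PySem.Str.startswith code "8" then PySem.Set.ofList ["beijing"]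
  else PySem.Set.empty

def match_market_filter_for_count_py_alt (stock : List (String × String)) (markets : List String) : Bool :=
  if markets.contains "all" || markets.isEmpty then true
  else
    match PySem.Dict.get? (PySem.Dict.mk stock) "code" with
    | none => false  -- Python raises KeyError here; excluded by Pre_
    | some code =>
      -- bool(matched & set(markets))
      !(PySem.Set.inter (pvCodeMarkets code) (PySem.Set.ofList markets)).isEmpty

-- ===== PRECONDITION & SPEC =====
-- Pre_ excludes exactly the inputs where Python A raises KeyError: markets is non-empty,
-- has no 'all', and stock has no 'code' key.
def Pre_match_market_filter_for_count_py (stock : List (String × String)) (markets : List String) : Prop :=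
  markets.contains "all" = true ∨ markets = [] ∨ PySem.Dict.contains (PySem.Dict.mk stock) "code" = true
instance (stock : List (String × String)) (markets : List String) : Decidable (Pre_match_market_filter_for_count_py stock markets) := by unfold Pre_match_market_filter_for_count_py; infer_instance

def pvWitness_match_market_filter_for_count_py : (List (String × String)) × List String :=
  ([("code", "688001")], ["star_market", "sz"])

def Spec_match_market_filter_for_count_py (stock : List (String × String)) (markets : List String) (out : Bool) : Prop := out = match_market_filter_for_count_py_alt stock markets
instance (stock : List (String × String)) (markets : List String) (out : Bool) : Decidable (Spec_match_market_filter_for_count_py stock markets out) := by unfold Spec_match_market_filter_for_count_py; infer_instance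

-- ===== CLAIM (what is proved, stated in full; the proofs are below) =====
def Claim_equal_match_market_filter_for_count_py : Prop := ∀ (stock : List (String × String)) (markets : List String), Dom_match_market_filter_for_count_py stock markets → Pre_match_market_filter_for_count_py stock markets → Spec_match_market_filter_for_count_py stock markets (match_market_filter_for_count_py stock markets)

-- ===== LEMMAS AND PROOFS =====

-- startswith '688' implies startswith '6'
lemma pv_sw688_imp (code : String) (h : PySem.Str.startswith code "688" = true) :
    PySem.Str.startswith code "6" = true := by
  simp only [PySem.Str.startswith_eq, PySem.Chars.startswith_iff] at h ⊢
  obtain ⟨t, ht⟩ := h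
  exact ⟨'8' :: '8' :: t, by simpa using ht⟩

-- startswith a single char ↔ that char is the head
lemma pv_sw_char (code : String) (c : Char) :
    PySem.Chars.startswith code.toList [c] = true ↔ code.toList.head? = some c := by
  rw [PySem.Chars.startswith_iff]
  cases code.toList with
  | nil => simp
  | cons a t => simp [List.cons_prefix_cons, eq_comm]

-- A's per-market check succeeds exactly on the labels B assigns to the code
lemma pv_check_eq_mem (m code : String) :
    (match pvMarketCheck? m code with | some b => b | none => false)
      = PySem.Set.contains (pvCodeMarkets code) m := by
  have e6 : PySem.Str.startswith code "6" = PySem.Chars.startswith code.toList ['6'] := by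
    rw [PySem.Str.startswith_eq]; rfl
  have e0 : PySem.Str.startswith code "0" = PySem.Chars.startswith code.toList ['0'] := by
    rw [PySem.Str.startswith_eq]; rfl
  have e3 : PySem.Str.startswith code "3" = PySem.Chars.startswith code.toList ['3'] := by
    rw [PySem.Str.startswith_eq]; rfl
  have e8 : PySem.Str.startswith code "8" = PySem.Chars.startswith code.toList ['8'] := by
    rw [PySem.Str.startswith_eq]; rfl
  by_cases h6 : PySem.Str.startswith code "6" = true
  · have hd : code.toList.head? = some '6' := (pv_sw_char code '6').mp (by rw [← e6]; exact h6)
    have h0 : PySem.Str.startswith code "0" = false := by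
      rw [e0, Bool.eq_false_iff]; intro h; rw [pv_sw_char, hd] at h; simp at h
    have h3 : PySem.Str.startswith code "3" = false := by
      rw [e3, Bool.eq_false_iff]; intro h; rw [pv_sw_char, hd] at h; simp at h
    have h8 : PySem.Str.startswith code "8" = false := by
      rw [e8, Bool.eq_false_iff]; intro h; rw [pv_sw_char, hd] at h; simp at h
    by_cases h688 : PySem.Str.startswith code "688" = true
    · simp only [pvMarketCheck?, pvCodeMarkets, h6, h688, h0, h3, h8]
      split_ifs with hm1 hm2 hm3 hm4 hm5 hm6 hm7 <;>
        simp_all [PySem.Set.contains, PySem.Set.ofList]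
    · simp only [pvMarketCheck?, pvCodeMarkets, h6, Bool.eq_false_iff.mpr h688, h0, h3, h8]
      split_ifs with hm1 hm2 hm3 hm4 hm5 hm6 hm7 <;>
        simp_all [PySem.Set.contains, PySem.Set.ofList]
  · have h688 : PySem.Str.startswith code "688" = false :=
      Bool.eq_false_iff.mpr (fun h => h6 (pv_sw688_imp code h))
    by_cases h0 : PySem.Str.startswith code "0" = true
    · have hd : code.toList.head? = some '0' := (pv_sw_char code '0').mp (by rw [← e0]; exact h0)
      have h3 : PySem.Str.startswith code "3" = false := by
        rw [e3, Bool.eq_false_iff]; intro h; rw [pv_sw_char, hd] at h; simp at h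
      have h8 : PySem.Str.startswith code "8" = false := by
        rw [e8, Bool.eq_false_iff]; intro h; rw [pv_sw_char, hd] at h; simp at h
      simp only [pvMarketCheck?, pvCodeMarkets, Bool.eq_false_iff.mpr h6, h688, h0, h3, h8]
      split_ifs with hm1 hm2 hm3 hm4 hm5 hm6 hm7 <;>
        simp_all [PySem.Set.contains, PySem.Set.ofList]
    · by_cases h3 : PySem.Str.startswith code "3" = true
      · have hd : code.toList.head? = some '3' := (pv_sw_char code '3').mp (by rw [← e3]; exact h3)
        have h8 : PySem.Str.startswith code "8" = false := by
          rw [e8, Bool.eq_false_iff]; intro h; rw [pv_sw_char, hd] at h; simp at h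
        simp only [pvMarketCheck?, pvCodeMarkets, Bool.eq_false_iff.mpr h6, h688,
          Bool.eq_false_iff.mpr h0, h3, h8]
        split_ifs with hm1 hm2 hm3 hm4 hm5 hm6 hm7 <;>
          simp_all [PySem.Set.contains, PySem.Set.ofList]
      · by_cases h8 : PySem.Str.startswith code "8" = true
        · simp only [pvMarketCheck?, pvCodeMarkets, Bool.eq_false_iff.mpr h6, h688,
            Bool.eq_false_iff.mpr h0, Bool.eq_false_iff.mpr h3, h8]
          split_ifs with hm1 hm2 hm3 hm4 hm5 hm6 hm7 <;>
            simp_all [PySem.Set.contains, PySem.Set.ofList]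
        · simp only [pvMarketCheck?, pvCodeMarkets, Bool.eq_false_iff.mpr h6, h688,
            Bool.eq_false_iff.mpr h0, Bool.eq_false_iff.mpr h3, Bool.eq_false_iff.mpr h8]
          split_ifs with hm1 hm2 hm3 hm4 hm5 hm6 hm7 <;>
            simp_all [PySem.Set.contains, PySem.Set.empty]

-- the early-return loop is an `any`
lemma pv_foldl_or {α : Type} (f : α → Bool) (l : List α) (a : Bool) :
    l.foldl (fun acc m => acc || f m) a = (a || l.any f) := by
  induction l generalizing a with
  | nil => simp
  | cons x t ih => simp [List.foldl_cons, ih, Bool.or_assoc]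

-- nonempty intersection with set(markets) is an `any` over markets
lemma pv_inter_nonempty (s : PySem.Set String) (ms : List String) :
    (!(PySem.Set.inter s (PySem.Set.ofList ms)).isEmpty)
      = ms.any (fun m => PySem.Set.contains s m) := by
  rw [Bool.eq_iff_iff]
  simp only [Bool.not_eq_true', List.isEmpty_eq_false_iff_exists_mem,
    List.any_eq_true, PySem.Set.inter, List.mem_filter]
  constructor
  · rintro ⟨x, hx, hc⟩
    have hm : x ∈ ms := by
      have := (PySem.Set.contains_iff _ _).mp hc
      simpa [PySem.Set.mem_ofList] using this
    exact ⟨x, hm, (PySem.Set.contains_iff _ _).mpr hx⟩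
  · rintro ⟨m, hm, hc⟩
    exact ⟨m, (PySem.Set.contains_iff _ _).mp hc,
      (PySem.Set.contains_iff _ _).mpr (by simpa [PySem.Set.mem_ofList] using hm)⟩

-- ===== VERDICT (by name: the statement is the Claim_ definition above) =====
theorem match_market_filter_for_count_py_spec : Claim_equal_match_market_filter_for_count_py := by
  intro stock markets _ _
  unfold Spec_match_market_filter_for_count_py
  unfold match_market_filter_for_count_py match_market_filter_for_count_py_alt
  by_cases hg : (markets.contains "all" || markets.isEmpty) = true
  · rw [if_pos hg, if_pos hg]
  · rw [if_neg hg, if_neg hg]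
    cases PySem.Dict.get? (PySem.Dict.mk stock) "code" with
    | none => rfl
    | some code =>
      dsimp only
      rw [pv_foldl_or, Bool.false_or, pv_inter_nonempty]
      exact congrArg markets.any (funext fun m => pv_check_eq_mem m code)
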